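-- pv_equiv track=rewrite | github.com/moldovancsaba/sovereign | apps/sovereign/nexus/agent_manager.py | resolve_model_name
-- ===== SOURCE A (Python) =====
-- from typing import Any, Dict, List, Optional
--
-- def resolve_model_name(requested: str, available: List[str]) -> str:
--     req = requested.strip()
--     if not req or not available:
--         return req
--     if req in available:
--         return req
--
--     req_lower = req.lower()
--     lower_map = {m.lower(): m for m in available}
--     if req_lower in lower_map:
--         return lower_map[req_lower]
--
--     base = req.split(":")[0].lower()
--     by_base = [m for m in available if m.split(":")[0].lower() == base]
--     if by_base:
--         by_base.sort(key=lambda x: (":instruct" in x, x.endswith(":latest"), len(x)), reverse=True)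
--         return by_base[0]
--     return req
-- ===== SOURCE B (Python) =====
-- def resolve_model_name(requested, available):
--     req = requested.strip()
--     if not req or not available:
--         return req
--     if req in available:
--         return req
--
--     req_lower = req.lower()
--     ci_match = None
--     for m in available:
--         if m.lower() == req_lower:
--             ci_match = m
--     if ci_match is not None:
--         return ci_match
--
--     base = req.split(":")[0].lower()
--     best = None
--     best_key = None
--     for m in available:
--         if m.split(":")[0].lower() == base:
--             key = (":instruct" in m, m.endswith(":latest"), len(m))
--             if best is None or key > best_key:
--                 best, best_key = m, key
--     return best if best is not None else req
-- ===== Notes on version B (the rewrite author's own statement) =====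
-- stated objective: alternative
-- what changed: A's dict-comprehension + lookup for the case-insensitive tier and filter + reverse-sort for the base tier are replaced by plain scans: a last-assignment scan for the case-insensitive match and a single-pass strict max (first among ties) for the base tier, removing the dict build and the sort.
import Mathlib
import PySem

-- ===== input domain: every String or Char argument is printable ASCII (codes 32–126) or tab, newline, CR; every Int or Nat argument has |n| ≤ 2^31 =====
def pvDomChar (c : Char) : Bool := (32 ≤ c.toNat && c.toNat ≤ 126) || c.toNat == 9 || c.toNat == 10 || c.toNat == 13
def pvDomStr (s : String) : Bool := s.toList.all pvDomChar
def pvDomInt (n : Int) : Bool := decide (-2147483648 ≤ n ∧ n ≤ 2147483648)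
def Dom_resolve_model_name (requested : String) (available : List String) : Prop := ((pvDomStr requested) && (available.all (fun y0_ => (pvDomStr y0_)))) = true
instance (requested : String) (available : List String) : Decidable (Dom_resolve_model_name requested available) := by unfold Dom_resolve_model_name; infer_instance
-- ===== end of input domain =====

-- B replaces A's dict-comprehension lookup and filter + reverse sort by plain scans
-- (a last-assignment scan for the case-insensitive tier, a single-pass max for the
-- base tier); objective: alternative (removes the dict build and the sort).

-- `m.split(":")[0].lower()` (shared subexpression of both Pythons)
def pvBaseOf (m : String) : String :=
  PySem.Str.lower (((PySem.Str.split? m ":").getD []).headD "")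

-- ===== PORT A =====
-- A's sort key `(":instruct" in x, x.endswith(":latest"), len(x))`: first two components as a
-- Lex pair, the third (`len(x)`) passed as sorted2's second key — Python tuple order = lexicographic
def pvKey1 (x : String) : Lex (Bool × Bool) :=
  toLex (PySem.Str.isIn ":instruct" x, PySem.Str.endswith x ":latest")

def resolve_model_name (requested : String) (available : List String) : String :=
  let req := PySem.Str.strip requested
  if req = "" ∨ available = [] then req
  else if available.contains req then req
  else
    let req_lower := PySem.Str.lower req
    let lower_map : PySem.Dict String String :=
      available.foldl (fun d m => d.insert (PySem.Str.lower m) m) ⟨[]⟩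
    match lower_map.get? req_lower with
    | some v => v
    | none =>
      let base := pvBaseOf req
      let by_base := available.filter (fun m => pvBaseOf m == base)
      match PySem.List.sorted2 by_base pvKey1 PySem.Str.len true with
      | [] => req
      | m :: _ => m

-- ===== PORT B =====
-- B's key tuple `(":instruct" in m, m.endswith(":latest"), len(m))`
def pvKeyB (m : String) : Bool × Bool × Int :=
  (PySem.Str.isIn ":instruct" m, PySem.Str.endswith m ":latest", PySem.Str.len m)

-- Python tuple `>` on B's key tuples
def pvGt (a b : Bool × Bool × Int) : Bool :=
  (!b.1 && a.1) ||
    (a.1 == b.1 && ((!b.2.1 && a.2.1) ||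
      (a.2.1 == b.2.1 && decide (b.2.2 < a.2.2))))

-- one iteration of B's base-tier loop
def pvBStep (base : String) (acc : Option (String × (Bool × Bool × Int))) (m : String) :
    Option (String × (Bool × Bool × Int)) :=
  if pvBaseOf m = base then
    let key := pvKeyB m
    match acc with
    | none => some (m, key)
    | some (_, bk) => if pvGt key bk then some (m, key) else acc
  else acc

def resolve_model_name_alt (requested : String) (available : List String) : String :=
  let req := PySem.Str.strip requested
  if req = "" ∨ available = [] then req
  else if available.contains req then req
  else
    let req_lower := PySem.Str.lower req
    let ci := available.foldl
      (fun a m => if PySem.Str.lower m = req_lower then some m else a) (none : Option String)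
    match ci with
    | some v => v
    | none =>
      let base := pvBaseOf req
      let best := available.foldl (pvBStep base)
        (none : Option (String × (Bool × Bool × Int)))
      match best with
      | some (b, _) => b
      | none => req

-- ===== PRECONDITION & SPEC =====
def Spec_resolve_model_name (requested : String) (available : List String) (out : String) : Prop := out = resolve_model_name_alt requested available
instance (requested : String) (available : List String) (out : String) : Decidable (Spec_resolve_model_name requested available out) := by unfold Spec_resolve_model_name; infer_instance

-- ===== CLAIM (what is proved, stated in full; the proofs are below) =====
def Claim_equal_resolve_model_name : Prop := ∀ (requested : String) (available : List String), Dom_resolve_model_name requested available → Spec_resolve_model_name requested available (resolve_model_name requested available)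

-- ===== LEMMAS AND PROOFS =====

-- the dict comprehension: lookup returns the LAST element whose .lower() equals the key
lemma pvDict (k : String) :
    ∀ (xs : List String) (d : PySem.Dict String String),
      (xs.foldl (fun d m => d.insert (PySem.Str.lower m) m) d).get? k =
        match (xs.filter (fun m => PySem.Str.lower m == k)).getLast? with
        | some v => some v
        | none => d.get? k := by
  intro xs
  induction xs with
  | nil => intro d; rfl
  | cons m xs ih =>
    intro d
    rw [List.foldl_cons, ih]
    by_cases h2 : PySem.Str.lower m = k
    · have hfil : (m :: xs).filter (fun m => PySem.Str.lower m == k) =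
          m :: xs.filter (fun m => PySem.Str.lower m == k) := by simp [h2]
      rw [hfil]
      cases hlast : (xs.filter (fun m => PySem.Str.lower m == k)).getLast? with
      | none =>
        have hnil : xs.filter (fun m => PySem.Str.lower m == k) = [] := by
          simpa [List.getLast?_eq_none_iff] using hlast
        rw [hnil]
        have h' : (d.insert (PySem.Str.lower m) m).get? k = some m := by
          rw [← h2]; exact PySem.Dict.get?_insert_self d (PySem.Str.lower m) m
        simp [h']
      | some v =>
        cases hfe : xs.filter (fun m => PySem.Str.lower m == k) with
        | nil => rw [hfe] at hlast; simp at hlast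
        | cons a t => rw [List.getLast?_cons_cons, ← hfe, hlast]
    · have hfil : (m :: xs).filter (fun m => PySem.Str.lower m == k) =
          xs.filter (fun m => PySem.Str.lower m == k) := by simp [h2]
      rw [hfil]
      cases hlast : (xs.filter (fun m => PySem.Str.lower m == k)).getLast? with
      | none =>
        exact PySem.Dict.get?_insert_of_ne d m (fun he => h2 he.symm)
      | some v => rfl

-- B's case-insensitive scan: the last matching element wins (or the accumulator stays)
lemma pvCiFold (l : String) :
    ∀ (xs : List String) (acc : Option String),
      xs.foldl (fun a m => if PySem.Str.lower m = l then some m else a) acc =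
        match (xs.filter (fun m => PySem.Str.lower m == l)).getLast? with
        | some v => some v
        | none => acc := by
  intro xs
  induction xs with
  | nil => intro acc; rfl
  | cons m xs ih =>
    intro acc
    rw [List.foldl_cons, ih]
    by_cases h2 : PySem.Str.lower m = l
    · have hfil : (m :: xs).filter (fun m => PySem.Str.lower m == l) =
          m :: xs.filter (fun m => PySem.Str.lower m == l) := by simp [h2]
      rw [hfil, if_pos h2]
      cases hlast : (xs.filter (fun m => PySem.Str.lower m == l)).getLast? with
      | none =>
        have hnil : xs.filter (fun m => PySem.Str.lower m == l) = [] := by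
          simpa [List.getLast?_eq_none_iff] using hlast
        rw [hnil]; rfl
      | some v =>
        cases hfe : xs.filter (fun m => PySem.Str.lower m == l) with
        | nil => rw [hfe] at hlast; simp at hlast
        | cons a t => rw [List.getLast?_cons_cons, ← hfe, hlast]
    · have hfil : (m :: xs).filter (fun m => PySem.Str.lower m == l) =
          xs.filter (fun m => PySem.Str.lower m == l) := by simp [h2]
      rw [hfil, if_neg h2]

-- sorted2's strict comparison for A's key pair (k1 = pvKey1, k2 = len)
def pvLtA (a b : String) : Bool :=
  decide (pvKey1 a < pvKey1 b) ||
    (!decide (pvKey1 b < pvKey1 a) && decide (PySem.Str.len a < PySem.Str.len b))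

-- first-of-maximum fold (shared characterisation of both tiers' winner)
def pvPick (w : String) (ys : List String) : String :=
  ys.foldl (fun b x => if pvLtA b x then x else b) w

-- B's tuple `>` agrees with A's sort-key comparison
lemma pvGt_eq (b x : String) :
    pvGt (pvKeyB x) (pvKeyB b) = pvLtA b x := by
  simp only [pvGt, pvKeyB, pvLtA, pvKey1, Prod.Lex.toLex_lt_toLex, Bool.lt_iff]
  cases hi : PySem.Str.isIn ":instruct" b <;> cases hi' : PySem.Str.isIn ":instruct" x <;>
    cases he : PySem.Str.endswith b ":latest" <;> cases he' : PySem.Str.endswith x ":latest" <;>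
    simp

-- B's base-tier fold from a populated state
lemma pvBFold_some (base : String) :
    ∀ (xs : List String) (w : String),
      xs.foldl (pvBStep base) (some (w, pvKeyB w)) =
        some (pvPick w (xs.filter (fun m => pvBaseOf m == base)),
              pvKeyB (pvPick w (xs.filter (fun m => pvBaseOf m == base)))) := by
  intro xs
  induction xs with
  | nil => intro w; rfl
  | cons m xs ih =>
    intro w
    by_cases hb : pvBaseOf m = base
    · have hfil : (m :: xs).filter (fun m => pvBaseOf m == base) =
          m :: xs.filter (fun m => pvBaseOf m == base) := by simp [hb]
      rw [List.foldl_cons, hfil]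
      have hstep : pvBStep base (some (w, pvKeyB w)) m =
          if pvGt (pvKeyB m) (pvKeyB w) then some (m, pvKeyB m) else some (w, pvKeyB w) := by
        simp [pvBStep, hb]
      rw [hstep, pvGt_eq]
      by_cases hk : pvLtA w m = true
      · rw [if_pos hk, ih m]
        simp only [pvPick, List.foldl_cons, hk, if_true]
      · simp only [Bool.not_eq_true] at hk
        rw [hk]
        simp only [Bool.false_eq_true, if_false]
        rw [ih w]
        simp only [pvPick, List.foldl_cons, hk, Bool.false_eq_true, if_false]
    · have hfil : (m :: xs).filter (fun m => pvBaseOf m == base) =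
          xs.filter (fun m => pvBaseOf m == base) := by simp [hb]
      rw [List.foldl_cons, show pvBStep base (some (w, pvKeyB w)) m = some (w, pvKeyB w) by
        simp [pvBStep, hb], ih w, hfil]

-- B's base-tier fold from the empty state
lemma pvBFold_none (base : String) :
    ∀ (xs : List String),
      xs.foldl (pvBStep base) none =
        match xs.filter (fun m => pvBaseOf m == base) with
        | [] => none
        | y :: t => some (pvPick y t, pvKeyB (pvPick y t)) := by
  intro xs
  induction xs with
  | nil => rfl
  | cons m xs ih =>
    by_cases hb : pvBaseOf m = base
    · have hfil : (m :: xs).filter (fun m => pvBaseOf m == base) =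
          m :: xs.filter (fun m => pvBaseOf m == base) := by simp [hb]
      rw [List.foldl_cons, show pvBStep base none m = some (m, pvKeyB m) by
        simp [pvBStep, hb], pvBFold_some base xs m, hfil]
    · have hfil : (m :: xs).filter (fun m => pvBaseOf m == base) =
          xs.filter (fun m => pvBaseOf m == base) := by simp [hb]
      rw [List.foldl_cons, show pvBStep base none m = none by simp [pvBStep, hb], ih, hfil]

-- head of a foldl of insertBy over a nonempty accumulator = first-of-maximum fold
lemma pvInsertByHead {α : Type} (before : α → α → Bool) :
    ∀ (ys : List α) (h : α) (t : List α),
      ∃ t', ys.foldl (fun acc x => PySem.List.insertBy before x acc) (h :: t) =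
        (ys.foldl (fun b x => if before x b then x else b) h) :: t' := by
  intro ys
  induction ys with
  | nil => intro h t; exact ⟨t, rfl⟩
  | cons x ys ih =>
    intro h t
    rw [List.foldl_cons, List.foldl_cons]
    by_cases hx : before x h = true
    · have : PySem.List.insertBy before x (h :: t) = x :: h :: t := by
        simp [PySem.List.insertBy, hx]
      rw [this, if_pos hx]
      exact ih x (h :: t)
    · simp only [Bool.not_eq_true] at hx
      have : PySem.List.insertBy before x (h :: t) = h :: PySem.List.insertBy before x t := by
        simp [PySem.List.insertBy, hx]
      rw [this, hx]
      simp only [Bool.false_eq_true, if_false]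
      exact ih h _

-- head of A's reverse-sorted by_base list = pvPick
lemma pvSortedHead (y : String) (t : List String) :
    ∃ t', PySem.List.sorted2 (y :: t) pvKey1 PySem.Str.len true = pvPick y t :: t' := by
  have h1 : PySem.List.sorted2 (y :: t) pvKey1 PySem.Str.len true =
      t.foldl (fun acc x => PySem.List.insertBy (fun a b => pvLtA b a) x acc) [y] := by
    simp [PySem.List.sorted2, pvLtA, PySem.List.insertBy]
  obtain ⟨t', ht'⟩ := pvInsertByHead (fun a b => pvLtA b a) t y []
  exact ⟨t', by rw [h1, ht']; rfl⟩

-- ===== VERDICT (by name: the statement is the Claim_ definition above) =====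
theorem resolve_model_name_spec : Claim_equal_resolve_model_name := by
  intro requested available _
  unfold Spec_resolve_model_name resolve_model_name resolve_model_name_alt
  simp only []
  set req := PySem.Str.strip requested with hreq
  by_cases hg : req = "" ∨ available = []
  · rw [if_pos hg, if_pos hg]
  rw [if_neg hg, if_neg hg]
  by_cases hc : available.contains req = true
  · rw [if_pos hc, if_pos hc]
  rw [if_neg hc, if_neg hc]
  set L := PySem.Str.lower req with hL
  set B := pvBaseOf req with hB
  rw [pvDict L available ⟨[]⟩, pvCiFold L available none]
  cases hlast : (available.filter (fun m => PySem.Str.lower m == L)).getLast? with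
  | some v => rfl
  | none =>
    rw [pvBFold_none B available,
      show (PySem.Dict.get? (⟨[]⟩ : PySem.Dict String String) L) = none from rfl]
    cases hfe : available.filter (fun m => pvBaseOf m == B) with
    | nil => rfl
    | cons y t =>
      obtain ⟨t', ht'⟩ := pvSortedHead y t
      rw [ht']
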